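-- pv_equiv track=rewrite | github.com/manuelschipper/nah | src/nah/bash.py | _extract_primary_target
-- ===== SOURCE A (Python) =====
-- def _extract_primary_target(tokens: list[str]) -> str:
--     """Extract the primary filesystem target from command tokens.
--
--     Heuristic: last non-flag argument that looks like a path.
--     """
--     candidates = []
--     last_non_flag = ""
--     for tok in tokens[1:]:  # skip command name
--         if tok.startswith("-"):
--             continue
--         last_non_flag = tok
--         if "/" in tok or tok.startswith("~") or tok.startswith("."):
--             candidates.append(tok)
--     # Return last path-like candidate, or fall back to last non-flag arg
--     # (handles bare relative paths like "new_dir")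
--     return candidates[-1] if candidates else last_non_flag
-- ===== SOURCE B (Python) =====
-- def _extract_primary_target(tokens: list[str]) -> str:
--     """Extract the primary filesystem target from command tokens.
--
--     Back-to-front scan: the first path-like non-flag token seen in reverse
--     is the last path-like candidate; otherwise fall back to the last
--     non-flag token (the first one seen in reverse).
--     """
--     found_non_flag = False
--     last_non_flag = ""
--     for tok in reversed(tokens[1:]):
--         if tok.startswith("-"):
--             continue
--         if "/" in tok or tok.startswith("~") or tok.startswith("."):
--             return tok
--         if not found_non_flag:
--             found_non_flag = True
--             last_non_flag = tok
--     return last_non_flag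
-- ===== Notes on version B (the rewrite author's own statement) =====
-- stated objective: alternative
-- what changed: Replaces the forward pass that accumulates a list of all path-like candidates with a single back-to-front scan that returns the first path-like non-flag token seen in reverse (with an early return) and no candidate list at all.
import Mathlib
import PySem

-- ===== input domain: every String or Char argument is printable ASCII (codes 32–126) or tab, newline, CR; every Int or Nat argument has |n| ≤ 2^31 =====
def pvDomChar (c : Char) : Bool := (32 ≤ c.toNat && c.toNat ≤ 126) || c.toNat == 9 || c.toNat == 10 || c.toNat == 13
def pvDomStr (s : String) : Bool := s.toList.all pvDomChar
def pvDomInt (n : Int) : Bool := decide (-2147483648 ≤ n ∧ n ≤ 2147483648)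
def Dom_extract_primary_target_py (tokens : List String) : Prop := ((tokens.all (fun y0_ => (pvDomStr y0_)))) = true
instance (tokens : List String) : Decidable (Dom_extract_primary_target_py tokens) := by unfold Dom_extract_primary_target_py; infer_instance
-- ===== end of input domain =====

-- B replaces A's forward pass that accumulates every path-like candidate with a
-- single back-to-front scan that returns the first path-like non-flag token it
-- meets (alternative decomposition; same asymptotic cost, no candidate list).

-- shared token predicates (both Pythons write these exact conditions)
def pvIsFlag (t : String) : Bool := PySem.Str.startswith t "-"
def pvIsPathlike (t : String) : Bool :=
  PySem.Str.isIn "/" t || PySem.Str.startswith t "~" || PySem.Str.startswith t "."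

-- ===== PORT A =====
-- A's loop body over (candidates, last_non_flag)
def pvStepA (st : List String × String) (tok : String) : List String × String :=
  if pvIsFlag tok then st
  else (if pvIsPathlike tok then st.1 ++ [tok] else st.1, tok)

def extract_primary_target_py (tokens : List String) : String :=
  let r := (PySem.List.slice tokens (some 1) none).foldl pvStepA ([], "")
  match r.1.getLast? with
  | some c => c          -- candidates[-1] (candidates nonempty)
  | none => r.2          -- fall back to last_non_flag

-- ===== PORT B =====
-- reverse scan with found_non_flag / last_non_flag and early return
def pvGoB (found : Bool) (lnf : String) : List String → String
  | [] => lnf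
  | t :: rest =>
    if pvIsFlag t then pvGoB found lnf rest
    else if pvIsPathlike t then t
    else if found then pvGoB found lnf rest
    else pvGoB true t rest

def extract_primary_target_py_alt (tokens : List String) : String :=
  pvGoB false "" (PySem.List.slice tokens (some 1) none).reverse

-- ===== PRECONDITION & SPEC =====
def Spec_extract_primary_target_py (tokens : List String) (out : String) : Prop := out = extract_primary_target_py_alt tokens
instance (tokens : List String) (out : String) : Decidable (Spec_extract_primary_target_py tokens out) := by unfold Spec_extract_primary_target_py; infer_instance

-- ===== CLAIM (what is proved, stated in full; the proofs are below) =====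
def Claim_equal_extract_primary_target_py : Prop := ∀ (tokens : List String), Dom_extract_primary_target_py tokens → Spec_extract_primary_target_py tokens (extract_primary_target_py tokens)

-- ===== LEMMAS AND PROOFS =====

-- with found = true, pvGoB over the reversed list returns the last candidate
-- of A's fold, falling back to the fixed lnf
theorem pvGoB_true (xs : List String) (l : String) :
    pvGoB true l xs.reverse = ((xs.foldl pvStepA ([], "")).1.getLast?).getD l := by
  induction xs using List.reverseRecOn with
  | nil => simp [pvGoB]
  | append_singleton ys t ih =>
    rw [List.reverse_append, List.foldl_append]
    simp only [List.reverse_cons, List.reverse_nil, List.nil_append, List.singleton_append,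
      List.foldl_cons, List.foldl_nil, pvGoB, pvStepA]
    by_cases hf : pvIsFlag t = true
    · simp [hf, ih]
    · by_cases hp : pvIsPathlike t = true
      · simp [hf, hp]
      · simp [hf, hp, ih]

-- with found = false, pvGoB over the reversed list computes A's result
theorem pvGoB_false (xs : List String) :
    pvGoB false "" xs.reverse =
      ((xs.foldl pvStepA ([], "")).1.getLast?).getD (xs.foldl pvStepA ([], "")).2 := by
  induction xs using List.reverseRecOn with
  | nil => simp [pvGoB]
  | append_singleton ys t ih =>
    rw [List.reverse_append, List.foldl_append]
    simp only [List.reverse_cons, List.reverse_nil, List.nil_append, List.singleton_append,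
      List.foldl_cons, List.foldl_nil, pvGoB, pvStepA]
    by_cases hf : pvIsFlag t = true
    · simp [hf, ih]
    · by_cases hp : pvIsPathlike t = true
      · simp [hf, hp]
      · simp [hf, hp, pvGoB_true ys t]

-- ===== VERDICT (by name: the statement is the Claim_ definition above) =====
theorem extract_primary_target_py_spec : Claim_equal_extract_primary_target_py := by
  intro tokens _
  unfold Spec_extract_primary_target_py extract_primary_target_py extract_primary_target_py_alt
  rw [pvGoB_false]
  cases h : ((PySem.List.slice tokens (some 1) none).foldl pvStepA ([], "")).1.getLast? <;>
    simp [h]
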